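-- pv_equiv track=rewrite | github.com/nguyenmanhtri/dsa | sort_sub_arrays/prefix_sum_approach.py | solution_b
-- ===== SOURCE A (Python) =====
-- def solution_b(A):
--     res = 0
--     curr_max = A[0]
--     for i in range(len(A)):
--         curr_max = max(curr_max, A[i])
--
--         if i == len(A) - 1 or curr_max <= A[i + 1]:
--             res += 1
--
--     return res
-- ===== SOURCE B (Python) =====
-- def solution_b(A):
--     # j counts iff A[j] is a weak left-to-right record (no earlier element
--     # exceeds it); the first position is vacuously a record.
--     return sum(1 for j in range(len(A)) if all(A[k] <= A[j] for k in range(j)))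
-- ===== Notes on version B (the rewrite author's own statement) =====
-- stated objective: alternative
-- what changed: A's single fused scan maintaining a running maximum and comparing it with the next element is replaced by a stateless quadratic count of weak left-to-right records: j counts iff all(A[k] <= A[j] for k in range(j)) -- no running max, no next-element comparison, no carried state.
-- outside the precondition, e.g. on solution_b([]): A raises IndexError, B returns 0
import Mathlib
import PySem

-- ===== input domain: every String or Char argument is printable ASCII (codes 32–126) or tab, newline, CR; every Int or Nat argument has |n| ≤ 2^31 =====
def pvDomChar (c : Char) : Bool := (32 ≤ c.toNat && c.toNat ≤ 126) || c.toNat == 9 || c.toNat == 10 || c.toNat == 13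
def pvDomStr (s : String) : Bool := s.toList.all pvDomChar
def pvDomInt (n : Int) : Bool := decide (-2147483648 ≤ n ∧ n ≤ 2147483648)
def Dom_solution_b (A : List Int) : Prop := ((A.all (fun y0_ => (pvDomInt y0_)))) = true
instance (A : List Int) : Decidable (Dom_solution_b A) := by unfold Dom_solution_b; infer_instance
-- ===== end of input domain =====

-- B replaces A's fused running-max scan by a stateless pairwise count of weak left-to-right records (alternative decomposition, not faster); equivalence of RETURN values on nonempty lists.


-- ===== PORT A =====
-- loop body of A: state (res, curr_max), i the loop index
def stepA (A : List Int) (s : Int × Int) (i : Int) : Int × Int :=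
  let cm := max s.2 (PySem.List.pyGetD A i 0)
  (if i = (A.length : Int) - 1 ∨ cm ≤ PySem.List.pyGetD A (i + 1) 0 then s.1 + 1 else s.1, cm)

def solution_b (A : List Int) : Int :=
  ((PySem.List.pyRange 0 (A.length : Int) 1).foldl (stepA A)
    (0, PySem.List.pyGetD A 0 0)).1

-- ===== PORT B =====
-- Source B: sum(1 for j in range(len(A)) if all(A[k] <= A[j] for k in range(j)))
def solution_b_alt (A : List Int) : Int :=
  (PySem.List.pyRange 0 (A.length : Int) 1).foldl
    (fun acc j =>
      if (PySem.List.pyRange 0 j 1).all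
          (fun k => decide (PySem.List.pyGetD A k 0 ≤ PySem.List.pyGetD A j 0))
      then acc + 1 else acc) 0

-- ===== PRECONDITION & SPEC =====
-- Pre_ excludes only the empty list, on which A raises IndexError at A[0].
def Pre_solution_b (A : List Int) : Prop := A ≠ []
instance (A : List Int) : Decidable (Pre_solution_b A) := by unfold Pre_solution_b; infer_instance
def pvWitness_solution_b : List Int := ([3, 1, 2, 5, 4] : List Int)

def Spec_solution_b (A : List Int) (out : Int) : Prop := out = solution_b_alt A
instance (A : List Int) (out : Int) : Decidable (Spec_solution_b A out) := by unfold Spec_solution_b; infer_instance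

-- ===== CLAIM (what is proved, stated in full; the proofs are below) =====
def Claim_equal_solution_b : Prop := ∀ (A : List Int), Dom_solution_b A → Pre_solution_b A → Spec_solution_b A (solution_b A)

-- ===== LEMMAS AND PROOFS =====

-- reference count for A's loop: pairs (running max, next element) with running max ≤ next
def hcount (m : Int) : List Int → Int
  | [] => 0
  | [_] => 0
  | x :: y :: rest => (if max m x ≤ y then 1 else 0) + hcount (max m x) (y :: rest)

-- reference count for B: records relative to a lower bound m
def rc (m : Int) : List Int → Int
  | [] => 0
  | x :: xs => (if m ≤ x then 1 else 0) + rc (max m x) xs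

theorem getD_append_cons (pre l : List Int) (x d : Int) :
    (pre ++ x :: l).getD pre.length d = x := by
  simp [List.getD]

theorem hcount_eq_rc (l : List Int) : ∀ (m x : Int),
    hcount m (x :: l) = rc (max m x) l := by
  induction l with
  | nil => intro m x; simp [hcount, rc]
  | cons y rest ih =>
    intro m x
    simp only [hcount, rc, ih]

theorem stepA_loop (A : List Int) : ∀ (suf pre : List Int) (m res : Int),
    A = pre ++ suf → suf ≠ [] →
    ((PySem.List.pyRange (pre.length : Int) (A.length : Int) 1).foldl (stepA A) (res, m)).1
      = res + 1 + hcount m suf := by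
  intro suf
  induction suf with
  | nil => intro pre m res _ hne; exact absurd rfl hne
  | cons x xs ih =>
    intro pre m res hA _
    have hlen : A.length = pre.length + 1 + xs.length := by
      subst hA; simp; omega
    have hlt : (pre.length : Int) < (A.length : Int) := by
      rw [hlen]; push_cast; omega
    rw [PySem.List.pyRange_one_cons hlt, List.foldl_cons]
    have hget : PySem.List.pyGetD A (pre.length : Int) 0 = x := by
      rw [PySem.List.pyGetD_natCast, hA, getD_append_cons]
    cases xs with
    | nil =>
      have hi : (pre.length : Int) = (A.length : Int) - 1 := by
        rw [hlen]; push_cast [List.length_nil]; omega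
      rw [PySem.List.pyRange_one_eq_nil
        (show (A.length : Int) ≤ (pre.length : Int) + 1 by rw [hi]; omega)]
      simp only [List.foldl_nil, stepA]
      rw [hget, if_pos (Or.inl hi)]
      simp [hcount]
    | cons y rest =>
      have hine : ¬ ((pre.length : Int) = (A.length : Int) - 1) := by
        rw [hlen]; push_cast [List.length_cons]; omega
      have hget1 : PySem.List.pyGetD A ((pre.length : Int) + 1) 0 = y := by
        have : ((pre.length : Int) + 1) = (((pre ++ [x]).length : Nat) : Int) := by
          simp
        rw [this, PySem.List.pyGetD_natCast]
        have : A = (pre ++ [x]) ++ y :: rest := by rw [hA]; simp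
        rw [this, getD_append_cons]
      simp only [stepA, hget, hget1, hine, false_or]
      have hrec := ih (pre ++ [x])
        (max m x) (if max m x ≤ y then res + 1 else res)
        (by rw [hA]; simp) (by simp)
      have hlen2 : (((pre ++ [x]).length : Nat) : Int) = (pre.length : Int) + 1 := by
        simp
      rw [hlen2] at hrec
      rw [show (if max m x ≤ y then res + 1 else res, max m x)
            = ((if max m x ≤ y then res + 1 else res), max m x) from rfl]
      rw [hrec]
      simp only [hcount]
      split_ifs <;> omega

-- B's loop, parametrised by the already-processed prefix: the all(..) test over
-- indices 0..j is equivalent to comparing against the maximum m of the prefix.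
theorem stepB_loop (A : List Int) : ∀ (suf pre : List Int) (m res : Int),
    A = pre ++ suf →
    (∀ v : Int, ((PySem.List.pyRange 0 (pre.length : Int) 1).all
        (fun k => decide (PySem.List.pyGetD A k 0 ≤ v))) = decide (m ≤ v)) →
    ((PySem.List.pyRange (pre.length : Int) (A.length : Int) 1).foldl
      (fun acc j =>
        if (PySem.List.pyRange 0 j 1).all
            (fun k => decide (PySem.List.pyGetD A k 0 ≤ PySem.List.pyGetD A j 0))
        then acc + 1 else acc) res)
      = res + rc m suf := by
  intro suf
  induction suf with
  | nil =>
    intro pre m res hA _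
    rw [PySem.List.pyRange_one_eq_nil (by subst hA; simp)]
    simp [rc]
  | cons x xs ih =>
    intro pre m res hA hinv
    have hlt : (pre.length : Int) < (A.length : Int) := by
      subst hA; simp only [List.length_append, List.length_cons]; push_cast; omega
    rw [PySem.List.pyRange_one_cons hlt, List.foldl_cons]
    have hget : PySem.List.pyGetD A (pre.length : Int) 0 = x := by
      rw [PySem.List.pyGetD_natCast, hA, getD_append_cons]
    rw [hget, hinv x]
    have hinv' : ∀ v : Int, ((PySem.List.pyRange 0 ((pre ++ [x]).length : Int) 1).all
        (fun k => decide (PySem.List.pyGetD A k 0 ≤ v))) = decide (max m x ≤ v) := by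
      intro v
      have hsucc : ((pre ++ [x]).length : Int) = (pre.length : Int) + 1 := by simp
      rw [hsucc, PySem.List.pyRange_one_succ_right (by positivity), List.all_append]
      rw [hinv v]
      simp only [List.all_cons, List.all_nil, Bool.and_true, hget]
      by_cases h1 : m ≤ v <;> by_cases h2 : x ≤ v <;> simp_all
    have hrec := ih (pre ++ [x]) (max m x) (if decide (m ≤ x) = true then res + 1 else res)
      (by rw [hA]; simp) hinv'
    have hlen2 : (((pre ++ [x]).length : Nat) : Int) = (pre.length : Int) + 1 := by simp
    rw [hlen2] at hrec
    rw [hrec]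
    simp only [rc, decide_eq_true_eq]
    split_ifs <;> omega

-- ===== VERDICT (by name: the statement is the Claim_ definition above) =====
theorem solution_b_spec : Claim_equal_solution_b := by
  intro A _ hpre
  unfold Spec_solution_b solution_b solution_b_alt
  obtain ⟨x, xs, rfl⟩ : ∃ x xs, A = x :: xs := by
    cases A with
    | nil => exact absurd rfl hpre
    | cons x xs => exact ⟨x, xs, rfl⟩
  have h0 : PySem.List.pyGetD (x :: xs) (0 : Int) 0 = x := by
    simp [PySem.List.pyGetD_zero_cons]
  -- A side
  have hA := stepA_loop (x :: xs) (x :: xs) [] x 0 (by simp) (by simp)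
  simp only [List.length_nil, Nat.cast_zero] at hA
  rw [h0, hA, hcount_eq_rc, max_self]
  -- B side: peel off the first iteration, then run the parametrised loop from pre = [x]
  have hn : (0 : Int) < ((x :: xs).length : Int) := by simp
  have hrange1 : PySem.List.pyRange 0 (1 : Int) 1 = [0] := by decide
  have hinv : ∀ v : Int, ((PySem.List.pyRange 0 (([x] : List Int).length : Int) 1).all
      (fun k => decide (PySem.List.pyGetD (x :: xs) k 0 ≤ v))) = decide (x ≤ v) := by
    intro v
    rw [show ((([x] : List Int).length : Nat) : Int) = 1 by simp, hrange1]
    simp [h0]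
  have hB := stepB_loop (x :: xs) xs [x] x 1 (by simp) hinv
  rw [show ((([x] : List Int).length : Nat) : Int) = 1 by simp] at hB
  rw [PySem.List.pyRange_one_cons hn, List.foldl_cons]
  rw [show PySem.List.pyRange 0 (0 : Int) 1 = [] from
    PySem.List.pyRange_one_eq_nil (le_refl 0)]
  simp only [List.all_nil, zero_add]
  rw [if_pos trivial]
  rw [show (0 : Int) + 1 = 1 from rfl] at *
  rw [hB]
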